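-- pv_equiv track=rewrite | github.com/krzyssikora/advent_of_code | aoc_2017/12_connections.py | get_group
-- ===== SOURCE A (Python) =====
-- def get_group(connections, program):
--     my_connections = {program}
--     queue = [program]
--     while True:
--         if len(queue) == 0:
--             break
--         current = queue.pop()
--         neighbours = connections[current]
--         for neighbour in neighbours:
--             if neighbour not in my_connections:
--                 queue.append(neighbour)
--                 my_connections.add(neighbour)
--     return my_connections
-- ===== SOURCE B (Python) =====
-- def get_group(connections, program):
--     # Recursive depth-first search: the call stack replaces A's explicit worklist.
--     seen = {program}
--
--     def visit(cur):
--         new = []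
--         for n in connections[cur]:
--             if n not in seen:
--                 seen.add(n)
--                 new.append(n)
--         for n in reversed(new):
--             visit(n)
--
--     visit(program)
--     return seen
-- ===== Notes on version B (the rewrite author's own statement) =====
-- stated objective: alternative
-- what changed: A's iterative worklist loop (explicit stack popped in a while-True) is replaced by a recursive depth-first search in which the call stack does the bookkeeping: visit(cur) marks cur's unseen neighbours and recurses into them.
import Mathlib
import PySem

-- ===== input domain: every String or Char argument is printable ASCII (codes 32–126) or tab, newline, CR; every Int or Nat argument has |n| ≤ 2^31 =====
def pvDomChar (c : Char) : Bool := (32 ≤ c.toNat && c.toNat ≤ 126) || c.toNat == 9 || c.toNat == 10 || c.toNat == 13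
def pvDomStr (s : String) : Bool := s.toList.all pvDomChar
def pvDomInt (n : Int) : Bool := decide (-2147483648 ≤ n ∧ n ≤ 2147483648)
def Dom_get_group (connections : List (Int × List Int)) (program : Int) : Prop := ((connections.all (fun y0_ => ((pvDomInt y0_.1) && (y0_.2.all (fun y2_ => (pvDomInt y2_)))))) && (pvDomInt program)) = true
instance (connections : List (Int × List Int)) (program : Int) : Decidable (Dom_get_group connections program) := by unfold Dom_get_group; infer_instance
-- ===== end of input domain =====

-- B replaces A's explicit worklist loop by a recursive depth-first search (call stack);
-- objective: alternative decomposition, same asymptotic cost.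


-- shared transliteration of the identical inner line in both Pythons:
-- "if n not in seen: <remember n>; seen.add(n)" — state = (remembered list, seen set)
def ggStep : (List Int × PySem.Set Int) → Int → (List Int × PySem.Set Int) :=
  fun p n => if PySem.Set.contains p.2 n then p else (p.1 ++ [n], PySem.Set.add p.2 n)

-- fuel: an upper bound on the number of loop iterations / visit calls (totality device only)
def ggFuel (connections : List (Int × List Int)) : Nat :=
  1 + (connections.map (fun p => p.2.length)).sum

-- ===== PORT A =====
-- 'while True: … queue.pop() …'; on a missing key Python raises KeyError (excluded by Pre_):
-- the port then continues as if the node had no neighbours.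
def ggLoopA (connections : List (Int × List Int)) : Nat → List Int → PySem.Set Int → PySem.Set Int
  | 0, _, seen => seen
  | f + 1, queue, seen =>
    if queue.length = 0 then seen
    else
      match PySem.List.pop? queue with
      | none => seen
      | some (current, queue') =>
        match PySem.Dict.get? (PySem.Dict.mk connections) current with
        | none => ggLoopA connections f queue' seen          -- KeyError in Python
        | some neighbours =>
          let qs := neighbours.foldl ggStep (queue', seen)
          ggLoopA connections f qs.1 qs.2

def get_group (connections : List (Int × List Int)) (program : Int) : List Int :=
  ggLoopA connections (ggFuel connections) [program] (PySem.Set.ofList [program])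

-- ===== PORT B =====
-- recursive DFS; 'visit cur' = its body ggChild (look the node up, discover its unseen
-- neighbours, recurse into them in reversed order), and ggRunB runs the pending children
-- left-to-right; the fuel consumed per call is threaded through (totality device only).
mutual

def ggChild (connections : List (Int × List Int)) (f : Nat) (cur : Int)
    (seen : PySem.Set Int) : {p : Nat × PySem.Set Int // p.1 ≤ f} :=
  match PySem.Dict.get? (PySem.Dict.mk connections) cur with
  | none => ⟨(f, seen), Nat.le_refl f⟩                     -- KeyError in Python
  | some ns =>
    let ds := ns.foldl ggStep ([], seen)                   -- new = ds.1, seen' = ds.2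
    ggRunB connections f ds.1.reverse ds.2                 -- visit the children (reversed(new))
  termination_by (f + 1, 0)
  decreasing_by exact Prod.Lex.left _ _ (Nat.lt_succ_self f)

def ggRunB (connections : List (Int × List Int)) :
    (f : Nat) → List Int → PySem.Set Int → {p : Nat × PySem.Set Int // p.1 ≤ f}
  | f, [], seen => ⟨(f, seen), Nat.le_refl f⟩
  | 0, _ :: _, seen => ⟨(0, seen), Nat.le_refl 0⟩
  | f + 1, cur :: rest, seen =>
    let r1 := ggChild connections f cur seen
    let r2 := ggRunB connections r1.1.1 rest r1.1.2        -- then the remaining pending nodes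
    ⟨r2.1, Nat.le_trans r2.2 (Nat.le_trans r1.2 (Nat.le_succ f))⟩
  termination_by f l _ => (f, l.length)
  decreasing_by
  · exact Prod.Lex.right _ (Nat.succ_pos _)
  · exact Prod.Lex.left _ _ (Nat.lt_succ_of_le r1.2)

end

def get_group_alt (connections : List (Int × List Int)) (program : Int) : List Int :=
  (ggRunB connections (ggFuel connections) [program] (PySem.Set.ofList [program])).1.2

-- ===== PRECONDITION & SPEC =====
-- Pre_ holds exactly when A returns: some set S of keys contains program, every node of S
-- has an entry, and S is closed under the neighbour lists — i.e. no node reachable from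
-- program is missing from connections.  Otherwise Python raises KeyError (in A and in B alike).
def Pre_get_group (connections : List (Int × List Int)) (program : Int) : Prop :=
  ∃ S ∈ (connections.map Prod.fst).sublists,
    program ∈ S ∧
    ∀ k ∈ S, PySem.Dict.contains (PySem.Dict.mk connections) k = true ∧
      ∀ v ∈ PySem.Dict.getD (PySem.Dict.mk connections) k [], v ∈ S

instance (connections : List (Int × List Int)) (program : Int) : Decidable (Pre_get_group connections program) := by unfold Pre_get_group; infer_instance

def pvWitness_get_group : (List (Int × List Int)) × Int := ([(0, [1, 2]), (1, [0]), (2, [2])], 0)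

def Spec_get_group (connections : List (Int × List Int)) (program : Int) (out : List Int) : Prop := out = get_group_alt connections program
instance (connections : List (Int × List Int)) (program : Int) (out : List Int) : Decidable (Spec_get_group connections program out) := by unfold Spec_get_group; infer_instance

-- ===== CLAIM (what is proved, stated in full; the proofs are below) =====
def Claim_equal_get_group : Prop := ∀ (connections : List (Int × List Int)) (program : Int), Dom_get_group connections program → Pre_get_group connections program → Spec_get_group connections program (get_group connections program)

-- ===== LEMMAS AND PROOFS =====

-- unfolding equations for ggRunB, stated on the underlying values
theorem ggRunB_nil (c : List (Int × List Int)) (f : Nat) (s : PySem.Set Int) :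
    (ggRunB c f [] s).1 = (f, s) := by
  rw [ggRunB]

theorem ggRunB_zero (c : List (Int × List Int)) (l : List Int) (s : PySem.Set Int) :
    (ggRunB c 0 l s).1 = (0, s) := by
  cases l with
  | nil => rw [ggRunB]
  | cons n rest => rw [ggRunB]

theorem ggChild_none (c : List (Int × List Int)) (f : Nat) (n : Int)
    (s : PySem.Set Int) (hg : PySem.Dict.get? (PySem.Dict.mk c) n = none) :
    (ggChild c f n s).1 = (f, s) := by
  rw [ggChild]
  simp only [hg]

theorem ggChild_some (c : List (Int × List Int)) (f : Nat) (n : Int)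
    (s : PySem.Set Int) (ns : List Int)
    (hg : PySem.Dict.get? (PySem.Dict.mk c) n = some ns) :
    (ggChild c f n s).1 =
      (ggRunB c f (ns.foldl ggStep ([], s)).1.reverse (ns.foldl ggStep ([], s)).2).1 := by
  rw [ggChild]
  simp only [hg]

theorem ggRunB_cons (c : List (Int × List Int)) (f : Nat) (n : Int) (rest : List Int)
    (s : PySem.Set Int) :
    (ggRunB c (f + 1) (n :: rest) s).1 =
      (ggRunB c (ggChild c f n s).1.1 rest (ggChild c f n s).1.2).1 := by
  rw [ggRunB]

-- the discovery fold only appends to the remembered list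
theorem ggStep_shift (ns : List Int) (a : List Int) (s : PySem.Set Int) :
    ns.foldl ggStep (a, s) =
      (a ++ (ns.foldl ggStep ([], s)).1, (ns.foldl ggStep ([], s)).2) := by
  induction ns generalizing a s with
  | nil => simp
  | cons n ns ih =>
    simp only [List.foldl_cons]
    by_cases h : PySem.Set.contains s n = true
    · simp only [ggStep]
      rw [if_pos h, if_pos h]
      exact ih a s
    · simp only [ggStep]
      rw [if_neg h, if_neg h]
      simp only [List.nil_append]
      rw [ih (a ++ [n]), ih [n]]
      simp

-- running an appended pending list = run the first part, then the second with the leftover fuel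
theorem ggRunB_append (connections : List (Int × List Int)) :
    ∀ (f : Nat) (l1 l2 : List Int) (s : PySem.Set Int),
      (ggRunB connections f (l1 ++ l2) s).1 =
        (ggRunB connections (ggRunB connections f l1 s).1.1 l2
          (ggRunB connections f l1 s).1.2).1 := by
  intro f
  induction f using Nat.strong_induction_on with
  | _ f ih =>
    intro l1 l2 s
    match l1 with
    | [] => rw [List.nil_append, ggRunB_nil]
    | n :: rest =>
      match f with
      | 0 =>
        rw [List.cons_append, ggRunB_zero, ggRunB_zero, ggRunB_zero]
      | f + 1 =>
        rw [List.cons_append]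
        rw [ggRunB_cons, ggRunB_cons]
        exact ih _ (Nat.lt_succ_of_le (ggChild connections f n s).2) rest l2 _

-- main bisimulation: A's worklist loop = B's runner on the reversed worklist
theorem ggLoopA_eq_ggRunB (connections : List (Int × List Int)) :
    ∀ (f : Nat) (q : List Int) (s : PySem.Set Int),
      ggLoopA connections f q s = (ggRunB connections f q.reverse s).1.2 := by
  intro f
  induction f with
  | zero =>
    intro q s
    rw [ggLoopA, ggRunB_zero]
  | succ f ih =>
    intro q s
    rcases List.eq_nil_or_concat q with rfl | ⟨qinit, cur, rfl⟩
    · rw [ggLoopA, List.reverse_nil, ggRunB_nil]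
      simp
    · rw [List.concat_eq_append,
        show (qinit ++ [cur]).reverse = cur :: qinit.reverse by simp]
      rw [ggLoopA]
      simp only [List.length_append, List.length_cons, List.length_nil]
      rw [if_neg (by omega), PySem.List.pop?_last]
      rw [ggRunB_cons]
      cases hg : PySem.Dict.get? (PySem.Dict.mk connections) cur with
      | none =>
        rw [ggChild_none _ _ _ _ hg]
        simp only [hg]
        exact ih qinit s
      | some ns =>
        rw [ggChild_some _ _ _ _ _ hg]
        simp only [hg]
        rw [ggStep_shift]
        rw [ih (qinit ++ (ns.foldl ggStep ([], s)).1) ((ns.foldl ggStep ([], s)).2)]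
        rw [show (qinit ++ (ns.foldl ggStep ([], s)).1).reverse
              = (ns.foldl ggStep ([], s)).1.reverse ++ qinit.reverse by simp]
        rw [ggRunB_append]

-- ===== VERDICT (by name: the statement is the Claim_ definition above) =====
theorem get_group_spec : Claim_equal_get_group := by
  intro connections program _ _
  unfold Spec_get_group get_group get_group_alt
  exact ggLoopA_eq_ggRunB connections (ggFuel connections) [program] _
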